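-- pv_equiv track=rewrite | github.com/code4romania/redirectioneaza | backend/donations/pdf.py | _format_bank_account
-- ===== SOURCE A (Python) =====
-- def _format_bank_account(bank_account: str):
--     # remove spaces from the bank account number
--     bank_account = bank_account.replace(" ", "")
--
--     account = ""
--     for i, letter in enumerate(bank_account):
--         account += letter
--         if (i + 1) % 4 == 0:
--             account += " "
--
--     return account
-- ===== SOURCE B (Python) =====
-- def _format_bank_account(bank_account: str):
--     # remove spaces, then emit the cleaned string in chunks of 4;
--     # a full chunk is followed by a space (so a multiple-of-4 length ends in a space)
--     bank_account = bank_account.replace(" ", "")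
--     parts = []
--     for start in range(0, len(bank_account), 4):
--         chunk = bank_account[start:start + 4]
--         parts.append(chunk + " " if len(chunk) == 4 else chunk)
--     return "".join(parts)
-- ===== Notes on version B (the rewrite author's own statement) =====
-- stated objective: idiomatic
-- what changed: B replaces A's per-character loop with an index-tracking modulus test by slicing the cleaned string into 4-character chunks (range step 4) and joining them, appending a space only after full chunks.
import Mathlib
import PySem

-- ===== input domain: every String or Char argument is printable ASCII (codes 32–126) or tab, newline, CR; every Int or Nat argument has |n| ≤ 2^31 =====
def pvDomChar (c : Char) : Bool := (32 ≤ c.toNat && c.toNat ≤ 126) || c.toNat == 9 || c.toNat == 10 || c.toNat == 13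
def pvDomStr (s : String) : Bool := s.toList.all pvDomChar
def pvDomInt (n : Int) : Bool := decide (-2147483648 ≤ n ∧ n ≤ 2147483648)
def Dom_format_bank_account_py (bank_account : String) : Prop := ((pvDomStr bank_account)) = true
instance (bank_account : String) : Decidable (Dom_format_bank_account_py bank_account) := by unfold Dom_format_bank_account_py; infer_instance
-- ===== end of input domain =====

-- B formats the cleaned string by slicing it into 4-character chunks instead of A's
-- per-character loop with a modulus test; same output, idiomatic decomposition.

-- ===== PORT A =====
-- A: strip spaces, then append each character, plus a space after every 4th ((i+1)%4==0).
def format_bank_account_py (bank_account : String) : String :=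
  let bank := PySem.Str.replace bank_account " " ""
  String.ofList
    ((PySem.List.enumerate bank.toList 0).foldl
      (fun account p =>
        let account := account ++ [p.2]
        if PySem.Int.mod (p.1 + 1) 4 == 0 then account ++ [' '] else account)
      [])

-- ===== PORT B =====
-- B: walk the cleaned char list chunk by chunk (take/drop 4 = Python slice s[i:i+4]
-- with the step-4 range); a full chunk gets a trailing space.
def pvChunks4Go : Nat → List Char → List Char
  | _, [] => []
  | 0, _ :: _ => []      -- never reached: fuel starts at the length and covers every chunk
  | fuel + 1, c :: rest =>
    (if ((c :: rest).take 4).length == 4 then (c :: rest).take 4 ++ [' ']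
     else (c :: rest).take 4) ++ pvChunks4Go fuel ((c :: rest).drop 4)

def pvChunks4 (l : List Char) : List Char := pvChunks4Go l.length l

def format_bank_account_py_alt (bank_account : String) : String :=
  String.ofList (pvChunks4 (PySem.Str.replace bank_account " " "").toList)

-- ===== PRECONDITION & SPEC =====
def Spec_format_bank_account_py (bank_account : String) (out : String) : Prop := out = format_bank_account_py_alt bank_account
instance (bank_account : String) (out : String) : Decidable (Spec_format_bank_account_py bank_account out) := by unfold Spec_format_bank_account_py; infer_instance

-- ===== CLAIM (what is proved, stated in full; the proofs are below) =====
def Claim_equal_format_bank_account_py : Prop := ∀ (bank_account : String), Dom_format_bank_account_py bank_account → Spec_format_bank_account_py bank_account (format_bank_account_py bank_account)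

-- ===== LEMMAS AND PROOFS =====

-- A's loop body, named for the proofs
def pvAStep (account : List Char) (p : Int × Char) : List Char :=
  let account := account ++ [p.2]
  if PySem.Int.mod (p.1 + 1) 4 == 0 then account ++ [' '] else account

lemma pvChunks4Go_irrel : ∀ (n m : Nat) (l : List Char), l.length ≤ n → l.length ≤ m →
    pvChunks4Go n l = pvChunks4Go m l := by
  intro n
  induction n with
  | zero =>
    intro m l hn _
    have : l = [] := List.length_eq_zero_iff.mp (Nat.le_zero.mp hn)
    subst this
    cases m <;> rfl
  | succ n ih =>
    intro m l hn hm
    cases l with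
    | nil => cases m <;> rfl
    | cons c rest =>
      cases m with
      | zero => simp at hm
      | succ m =>
        simp only [pvChunks4Go]
        congr 1
        apply ih
        · simp only [List.length_drop, List.length_cons]
          simp only [List.length_cons] at hn
          omega
        · simp only [List.length_drop, List.length_cons]
          simp only [List.length_cons] at hm
          omega

lemma pvChunks4_nil : pvChunks4 [] = [] := rfl

lemma pvChunks4_cons (c : Char) (rest : List Char) :
    pvChunks4 (c :: rest) =
      (if ((c :: rest).take 4).length == 4 then (c :: rest).take 4 ++ [' ']
       else (c :: rest).take 4) ++ pvChunks4 ((c :: rest).drop 4) := by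
  unfold pvChunks4
  simp only [List.length_cons, pvChunks4Go]
  congr 1
  apply pvChunks4Go_irrel
  · simp only [List.length_drop, List.length_cons]; omega
  · exact le_rfl

lemma pvAStep_foldl_acc (l : List Char) : ∀ (s : Int) (acc : List Char),
    (PySem.List.enumerate l s).foldl pvAStep acc
      = acc ++ (PySem.List.enumerate l s).foldl pvAStep [] := by
  induction l with
  | nil => intro s acc; simp [PySem.List.enumerate_nil]
  | cons c rest ih =>
    intro s acc
    simp only [PySem.List.enumerate_cons, List.foldl_cons]
    rw [ih (s + 1) (pvAStep acc (s, c)), ih (s + 1) (pvAStep [] (s, c))]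
    simp [pvAStep]
    split <;> simp

lemma pvMod4 (s : Int) (h : s % 4 = 0) :
    ¬ (4 ∣ s + 1) ∧ ¬ (4 ∣ s + 2) ∧ ¬ (4 ∣ s + 3) ∧ (4 ∣ s + 4) ∧ (s + 4) % 4 = 0 := by
  omega

lemma pvMain : ∀ (n : Nat) (l : List Char) (s : Int), l.length ≤ n → s % 4 = 0 →
    (PySem.List.enumerate l s).foldl pvAStep [] = pvChunks4 l := by
  intro n
  induction n with
  | zero =>
    intro l s hl _
    have : l = [] := List.length_eq_zero_iff.mp (Nat.le_zero.mp hl)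
    subst this
    simp [PySem.List.enumerate_nil, pvChunks4_nil]
  | succ n ih =>
    intro l s hl hs
    match l with
    | [] => simp [PySem.List.enumerate_nil, pvChunks4_nil]
    | [a] =>
      have h := pvMod4 s hs
      simp [PySem.List.enumerate_cons, PySem.List.enumerate_nil, pvAStep,
        pvChunks4_cons, pvChunks4_nil, h.1]
    | [a, b] =>
      have h := pvMod4 s hs
      simp [PySem.List.enumerate_cons, PySem.List.enumerate_nil, pvAStep,
        pvChunks4_cons, pvChunks4_nil, h.1, h.2.1, add_assoc]
    | [a, b, c] =>
      have h := pvMod4 s hs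
      simp [PySem.List.enumerate_cons, PySem.List.enumerate_nil, pvAStep,
        pvChunks4_cons, pvChunks4_nil, h.1, h.2.1, h.2.2.1, add_assoc]
    | a :: b :: c :: d :: rest =>
      have h := pvMod4 s hs
      have hlen : rest.length ≤ n := by simp at hl; omega
      have h4 : (4 : Int) ∣ s := by omega
      simp only [PySem.List.enumerate_cons, List.foldl_cons,
        show s + 1 + 1 = s + 2 by ring, show s + 2 + 1 = s + 3 by ring,
        show s + 3 + 1 = s + 4 by ring]
      rw [pvAStep_foldl_acc, ih rest (s + 4) hlen h.2.2.2.2]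
      simp [pvAStep, show s + 1 + 1 = s + 2 by ring, show s + 2 + 1 = s + 3 by ring,
        show s + 3 + 1 = s + 4 by ring, h.1, h.2.1, h.2.2.1, h4, pvChunks4_cons]

-- ===== VERDICT (by name: the statement is the Claim_ definition above) =====
theorem format_bank_account_py_spec : Claim_equal_format_bank_account_py := by
  intro s _
  unfold Spec_format_bank_account_py format_bank_account_py format_bank_account_py_alt
  show String.ofList
      ((PySem.List.enumerate (PySem.Str.replace s " " "").toList 0).foldl pvAStep [])
    = String.ofList (pvChunks4 (PySem.Str.replace s " " "").toList)
  rw [pvMain ((PySem.Str.replace s " " "").toList.length)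
    ((PySem.Str.replace s " " "").toList) 0 le_rfl (by decide)]
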